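-- pv_equiv track=rewrite | github.com/crapzor/EDAN70-project | chunker.py | add_words_from_train_file
-- ===== SOURCE A (Python) =====
-- def add_words_from_train_file(word_index, train_dictionary, LENGTH):
--     idx = LENGTH
--     for sentence in train_dictionary:
--         for word in sentence['form']:
--             if word not in word_index:
--                 idx += 1
--                 word_index[word] = idx
--     return idx
-- ===== SOURCE B (Python) =====
-- def add_words_from_train_file(word_index, train_dictionary, LENGTH):
--     # Pipeline: flatten all words, keep the unseen ones, dedupe in first-occurrence
--     # order, then number them; the return value is LENGTH + len(new_words).
--     words = [w for sentence in train_dictionary for w in sentence['form']]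
--     new_words = list(dict.fromkeys(w for w in words if w not in word_index))
--     for i, w in enumerate(new_words, start=LENGTH + 1):
--         word_index[w] = i
--     return LENGTH + len(new_words)
-- ===== Notes on version B (the rewrite author's own statement) =====
-- stated objective: alternative
-- what changed: B replaces A's single stateful nested loop threading a counter through the dict by a stateless pipeline: flatten all words into one list, filter out the already-indexed ones, dedupe with dict.fromkeys, then number the resulting list and return LENGTH + its length.
import Mathlib
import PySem

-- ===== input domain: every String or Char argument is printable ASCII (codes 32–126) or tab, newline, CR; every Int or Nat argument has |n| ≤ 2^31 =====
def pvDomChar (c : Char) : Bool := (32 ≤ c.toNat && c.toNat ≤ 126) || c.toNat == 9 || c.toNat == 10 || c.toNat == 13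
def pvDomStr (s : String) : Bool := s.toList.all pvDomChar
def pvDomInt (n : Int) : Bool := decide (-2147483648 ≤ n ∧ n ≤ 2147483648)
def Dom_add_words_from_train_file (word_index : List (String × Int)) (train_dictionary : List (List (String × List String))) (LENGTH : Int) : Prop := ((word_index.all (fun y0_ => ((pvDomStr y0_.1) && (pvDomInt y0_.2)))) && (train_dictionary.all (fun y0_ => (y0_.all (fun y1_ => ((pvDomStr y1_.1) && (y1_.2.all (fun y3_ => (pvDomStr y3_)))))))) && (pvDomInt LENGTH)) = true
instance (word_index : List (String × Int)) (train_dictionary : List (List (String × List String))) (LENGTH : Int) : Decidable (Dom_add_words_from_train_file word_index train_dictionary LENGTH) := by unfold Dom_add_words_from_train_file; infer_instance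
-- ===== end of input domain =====

-- B replaces A's stateful nested loop by a flatten/filter/dedup pipeline; same cost, different
-- algorithm shape. A and B mutate word_index identically in Python; the equivalence proved here
-- is about the RETURN value only.

-- ===== PORT A =====
-- A threads (word_index-as-dict, idx) through one nested loop; sentence['form'] is a first-match
-- lookup (KeyError = none, excluded by Pre_; getD [] is only reached outside Pre_).
def add_words_from_train_file (word_index : List (String × Int)) (train_dictionary : List (List (String × List String))) (LENGTH : Int) : Int :=
  (train_dictionary.foldl
    (fun (st : PySem.Dict String Int × Int) sentence =>
      (((PySem.Dict.mk sentence).get? "form").getD []).foldl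
        (fun st word =>
          if st.1.contains word then st
          else (st.1.insert word (st.2 + 1), st.2 + 1))
        st)
    (PySem.Dict.mk word_index, LENGTH)).2

-- ===== PORT B =====
-- B: flatten, filter the unseen words, dedupe (dict.fromkeys = PySem.List.dedup), count.
-- The Python's enumerate pass only mutates word_index and does not affect the return value.
def add_words_from_train_file_alt (word_index : List (String × Int)) (train_dictionary : List (List (String × List String))) (LENGTH : Int) : Int :=
  let words := train_dictionary.flatMap (fun sentence => ((PySem.Dict.mk sentence).get? "form").getD [])
  let new_words := PySem.List.dedup (words.filter (fun w => !(PySem.Dict.mk word_index).contains w))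
  LENGTH + (new_words.length : Int)

-- ===== PRECONDITION & SPEC =====
-- Pre_ excludes exactly the inputs where sentence['form'] raises KeyError (both A and B raise there).
def Pre_add_words_from_train_file (word_index : List (String × Int)) (train_dictionary : List (List (String × List String))) (LENGTH : Int) : Prop :=
  ∀ sentence ∈ train_dictionary, "form" ∈ sentence.map Prod.fst
instance (word_index : List (String × Int)) (train_dictionary : List (List (String × List String))) (LENGTH : Int) : Decidable (Pre_add_words_from_train_file word_index train_dictionary LENGTH) := by unfold Pre_add_words_from_train_file; infer_instance

def pvWitness_add_words_from_train_file : (List (String × Int)) × (List (List (String × List String))) × Int :=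
  ([("a", 1)], [[("form", ["a", "b", "c", "b"])]], 1)

def Spec_add_words_from_train_file (word_index : List (String × Int)) (train_dictionary : List (List (String × List String))) (LENGTH : Int) (out : Int) : Prop := out = add_words_from_train_file_alt word_index train_dictionary LENGTH
instance (word_index : List (String × Int)) (train_dictionary : List (List (String × List String))) (LENGTH : Int) (out : Int) : Decidable (Spec_add_words_from_train_file word_index train_dictionary LENGTH out) := by unfold Spec_add_words_from_train_file; infer_instance

-- ===== CLAIM (what is proved, stated in full; the proofs are below) =====
def Claim_equal_add_words_from_train_file : Prop := ∀ (word_index : List (String × Int)) (train_dictionary : List (List (String × List String))) (LENGTH : Int), Dom_add_words_from_train_file word_index train_dictionary LENGTH → Pre_add_words_from_train_file word_index train_dictionary LENGTH → Spec_add_words_from_train_file word_index train_dictionary LENGTH (add_words_from_train_file word_index train_dictionary LENGTH)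

-- ===== LEMMAS AND PROOFS =====

-- Membership in Set.add, as Bool equations.
theorem pv_contains_add {s : PySem.Set String} {w y : String} :
    PySem.Set.contains (PySem.Set.add s w) y = (y == w || PySem.Set.contains s y) := by
  rw [Bool.eq_iff_iff, PySem.Set.contains_iff, PySem.Set.mem_add]
  simp [beq_iff_eq, or_comm]

theorem pv_length_add_of_not {s : PySem.Set String} {w : String}
    (h : PySem.Set.contains s w = false) :
    (PySem.Set.add s w).length = s.length + 1 := by
  have h' : w ∉ s := by simpa using h
  simp [PySem.Set.add, h']

theorem pv_add_of_contains {s : PySem.Set String} {w : String}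
    (h : PySem.Set.contains s w = true) : PySem.Set.add s w = s := by
  have h' : w ∈ s := by simpa using h
  simp [PySem.Set.add, h']

theorem pv_contains_nil {y : String} :
    PySem.Set.contains (([] : List String) : PySem.Set String) y = false := by
  simp [PySem.Set.contains]

-- A's nested loop equals the fold over the flattened word list.
theorem pv_flatten (td : List (List (String × List String))) (st : PySem.Dict String Int × Int) :
    td.foldl
      (fun st sentence =>
        (((PySem.Dict.mk sentence).get? "form").getD []).foldl
          (fun st word =>
            if st.1.contains word then st
            else (st.1.insert word (st.2 + 1), st.2 + 1)) st) st
    = (td.flatMap (fun sentence => ((PySem.Dict.mk sentence).get? "form").getD [])).foldl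
        (fun st word =>
          if st.1.contains word then st
          else (st.1.insert word (st.2 + 1), st.2 + 1)) st := by
  induction td generalizing st with
  | nil => rfl
  | cons sentence rest ih => simp [List.flatMap_cons, List.foldl_append, ih]

-- M: A's fold over the flat word list, measured against a set fold with the same membership.
theorem pv_count (ws : List String) (d : PySem.Dict String Int) (idx : Int) (s : PySem.Set String)
    (h : ∀ w ∈ ws, d.contains w = PySem.Set.contains s w) :
    (ws.foldl
        (fun st word =>
          if st.1.contains word then st
          else (st.1.insert word (st.2 + 1), st.2 + 1)) (d, idx)).2 + (s.length : Int)
      = idx + ((ws.foldl PySem.Set.add s).length : Int) := by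
  induction ws generalizing d idx s with
  | nil => simp only [List.foldl_nil]
  | cons w rest ih =>
    have hw := h w (List.mem_cons_self ..)
    simp only [List.foldl_cons, hw]
    by_cases hc : PySem.Set.contains s w = true
    · rw [hc, pv_add_of_contains hc]
      simp only [if_true]
      exact ih d idx s (fun y hy => h y (List.mem_cons_of_mem _ hy))
    · rw [Bool.not_eq_true] at hc
      rw [hc]
      simp only [Bool.false_eq_true, if_false]
      have h' : ∀ y ∈ rest, (d.insert w (idx + 1)).contains y
          = PySem.Set.contains (PySem.Set.add s w) y := by
        intro y hy
        rw [PySem.Dict.contains_insert, pv_contains_add, h y (List.mem_cons_of_mem _ hy)]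
      have := ih (d.insert w (idx + 1)) (idx + 1) (PySem.Set.add s w) h'
      rw [pv_length_add_of_not hc] at this
      push_cast at this ⊢
      omega

-- Elements already in s never change a Set.add fold: filtering them away first is a no-op.
theorem pv_filter_noop (l : List String) (s t : PySem.Set String)
    (hst : ∀ x, PySem.Set.contains s x = true → PySem.Set.contains t x = true) :
    l.foldl PySem.Set.add t
      = (l.filter (fun x => !PySem.Set.contains s x)).foldl PySem.Set.add t := by
  induction l generalizing t with
  | nil => rfl
  | cons x l ih =>
    by_cases hx : PySem.Set.contains s x = true
    · simp only [List.foldl_cons, List.filter_cons, hx, Bool.not_true, Bool.false_eq_true,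
        if_false, pv_add_of_contains (hst x hx)]
      exact ih t hst
    · rw [Bool.not_eq_true] at hx
      simp only [List.foldl_cons, List.filter_cons, hx, Bool.not_false, if_true]
      refine ih (PySem.Set.add t x) (fun y hy => ?_)
      rw [pv_contains_add, hst y hy, Bool.or_true]

-- Two accumulators agreeing on the fold's elements grow by the same amount.
theorem pv_grow (m : List String) (s t : PySem.Set String)
    (h : ∀ y ∈ m, PySem.Set.contains s y = PySem.Set.contains t y) :
    (m.foldl PySem.Set.add s).length + t.length = (m.foldl PySem.Set.add t).length + s.length := by
  induction m generalizing s t with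
  | nil => simp only [List.foldl_nil]; omega
  | cons y m ih =>
    have hy := h y (List.mem_cons_self ..)
    simp only [List.foldl_cons]
    by_cases hc : PySem.Set.contains s y = true
    · rw [pv_add_of_contains hc, pv_add_of_contains (hy ▸ hc)]
      exact ih s t (fun z hz => h z (List.mem_cons_of_mem _ hz))
    · rw [Bool.not_eq_true] at hc
      have h' : ∀ z ∈ m, PySem.Set.contains (PySem.Set.add s y) z
          = PySem.Set.contains (PySem.Set.add t y) z := by
        intro z hz
        rw [pv_contains_add, pv_contains_add, h z (List.mem_cons_of_mem _ hz)]
      have := ih (PySem.Set.add s y) (PySem.Set.add t y) h'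
      rw [pv_length_add_of_not hc, pv_length_add_of_not (hy ▸ hc)] at this
      omega

-- ===== VERDICT (by name: the statement is the Claim_ definition above) =====
theorem add_words_from_train_file_spec : Claim_equal_add_words_from_train_file := by
  intro word_index train_dictionary LENGTH _ _
  unfold Spec_add_words_from_train_file
  simp only [add_words_from_train_file, add_words_from_train_file_alt]
  rw [pv_flatten]
  set flat := train_dictionary.flatMap
    (fun sentence => ((PySem.Dict.mk sentence).get? "form").getD []) with hflat
  set D := PySem.Dict.mk word_index with hD
  set s0 : PySem.Set String := PySem.Set.ofList D.keys with hs0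
  have hmem : ∀ w, D.contains w = PySem.Set.contains s0 w := by
    intro w
    rw [Bool.eq_iff_iff, PySem.Dict.contains_iff_mem_keys, PySem.Set.contains_iff, hs0,
      PySem.Set.mem_ofList]
  have hM := pv_count flat D LENGTH s0 (fun w _ => hmem w)
  set lf := flat.filter (fun x => !PySem.Set.contains s0 x) with hlf
  have hN := pv_filter_noop flat s0 s0 (fun _ hx => hx)
  rw [← hlf] at hN
  have hG := pv_grow lf s0 (([] : List String) : PySem.Set String) (by
    intro y hy
    rw [hlf] at hy
    have hy' := List.of_mem_filter hy
    simp only [Bool.not_eq_true'] at hy'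
    rw [hy', pv_contains_nil])
  have hfilter : flat.filter (fun w => !D.contains w) = lf := by
    rw [hlf]; exact List.filter_congr (fun x _ => by rw [hmem x])
  rw [hfilter, PySem.List.dedup_eq_ofList, PySem.Set.ofList_eq_foldl]
  rw [hN] at hM
  simp only [List.length_nil] at hG
  omega
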